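-- pv_equiv track=rewrite | github.com/spillay/AHRM | EmoWebService/App/textmining/applications/appemotions.py | process_run_length
-- ===== SOURCE A (Python) =====
-- def process_run_length(run_length):
--     """
--     compute running length for emotional bursts
--
--     low level function
--
--     Parameters
--     ----------
--     steady_states : list of tuple pairs
--         [(emotion, run_length)]
--         for prime emotions ['Joy', 'Joy', 'Joy', 'Joy', 'Anger', 'Joy', 'Joy']
--         [
--             ('Joy',   3),
--             ('Anger', 0),
--             ('Joy',   1),
--         ]
--
--     Returns
--     -------
--     d: dict of value
--         maximum running length for each emotional state
--         {
--             'Joy'   :3,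
--             'Anger' :0,
--         }
--     dd: dict of list
--         all running length in the list
--         {
--             'Joy'   :[1,3],
--             'Anger' :[0],
--         }
--     negative_max: int
--         maximum negative running length
--     """
--     negative_emotions = [
--         u'Anger',   u'Anxiety',
--         u'Disgust', u'Fear',
--         u'Sadness', u'Shame',
--     ]
--     d = {}
--     dd = {}
--     for e,c in run_length:
--         if e in d:
--             if d[e] < c:
--                 d[e] = c
--             dd[e].append(c)
--         else:
--             d[e] = c
--             dd[e] = [c]
--
--     negative_max = 0
--     for e in negative_emotions:
--         if e in d:
--             if d[e] > negative_max:
--                 negative_max = d[e]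
--
--     return d, dd, negative_max
-- ===== SOURCE B (Python) =====
-- def process_run_length(run_length):
--     negative_emotions = [
--         u'Anger',   u'Anxiety',
--         u'Disgust', u'Fear',
--         u'Sadness', u'Shame',
--     ]
--     keys = list(dict.fromkeys(e for e, _ in run_length))
--     dd = {e: [c for x, c in run_length if x == e] for e in keys}
--     d = {e: max(cs) for e, cs in dd.items()}
--     negative_max = max([0] + [d[e] for e in negative_emotions if e in d])
--     return d, dd, negative_max
-- ===== Notes on version B (the rewrite author's own statement) =====
-- stated objective: alternative
-- what changed: B never maintains mutable per-key state: it first extracts the distinct emotions (dict.fromkeys), then builds each emotion's run list by filtering the whole input for that emotion (a per-key nested scan), derives the per-emotion maxima from those lists, and takes negative_max as a 0-floored max over the negatives present, instead of A's single pass that updates two dicts entry by entry.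
import Mathlib
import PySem

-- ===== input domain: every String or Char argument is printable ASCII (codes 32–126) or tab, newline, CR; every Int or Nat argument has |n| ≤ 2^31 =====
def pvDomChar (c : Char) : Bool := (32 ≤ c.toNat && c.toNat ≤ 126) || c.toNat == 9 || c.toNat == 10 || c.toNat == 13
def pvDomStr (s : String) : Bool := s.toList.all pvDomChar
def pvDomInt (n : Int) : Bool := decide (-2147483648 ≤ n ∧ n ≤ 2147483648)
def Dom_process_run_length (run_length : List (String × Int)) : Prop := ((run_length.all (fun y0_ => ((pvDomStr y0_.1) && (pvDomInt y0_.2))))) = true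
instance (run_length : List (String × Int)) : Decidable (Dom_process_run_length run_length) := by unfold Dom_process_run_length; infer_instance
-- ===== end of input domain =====

-- B replaces A's single dict-mutating pass by staged passes: distinct keys first, then a
-- per-key filter of the whole input for each emotion's runs (alternative decomposition, same results).


-- ===== PORT A =====
def pvNegativeEmotions : List String :=
  ["Anger", "Anxiety", "Disgust", "Fear", "Sadness", "Shame"]

-- one iteration of A's loop over (e, c): d keeps the running max, dd the list of runs
def pvStepA (s : PySem.Dict String Int × PySem.Dict String (List Int)) (p : String × Int) :
    PySem.Dict String Int × PySem.Dict String (List Int) :=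
  let d := s.1; let dd := s.2; let e := p.1; let c := p.2
  if d.contains e then
    ((if d.getD e 0 < c then d.insert e c else d), dd.modify e [] (· ++ [c]))
  else
    (d.insert e c, dd.insert e [c])

def process_run_length (run_length : List (String × Int)) : (List (String × Int)) × (List (String × List Int)) × Int :=
  let s := run_length.foldl pvStepA (PySem.Dict.empty, PySem.Dict.empty)
  let d := s.1; let dd := s.2
  let negative_max := pvNegativeEmotions.foldl
    (fun nm e => if d.contains e then (if d.getD e 0 > nm then d.getD e 0 else nm) else nm) 0
  (d.items, dd.items, negative_max)

-- ===== PORT B =====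
-- max(cs) for the nonempty lists B builds (getD 0 is never reached: every list holds ≥ 1 element)
def pvMaxI (l : List Int) : Int := (PySem.List.max? l (fun x => x)).getD 0

-- [c for x, c in run_length if x == e]
def pvRuns (l : List (String × Int)) (e : String) : List Int :=
  (l.filter (fun p => p.1 == e)).map (·.2)

def process_run_length_alt (run_length : List (String × Int)) : (List (String × Int)) × (List (String × List Int)) × Int :=
  let keys := PySem.List.dedup (run_length.map (·.1))      -- list(dict.fromkeys(e for e, _ in run_length))
  let dd := keys.map (fun e => (e, pvRuns run_length e))
  let d := dd.map (fun p => (p.1, pvMaxI p.2))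
  let negative_max :=
    (PySem.List.max? ((0 : Int) :: pvNegativeEmotions.filterMap (fun e => (PySem.Dict.mk d).get? e)) (fun x => x)).getD 0
  (d, dd, negative_max)

-- ===== PRECONDITION & SPEC =====
def Spec_process_run_length (run_length : List (String × Int)) (out : (List (String × Int)) × (List (String × List Int)) × Int) : Prop := out = process_run_length_alt run_length
instance (run_length : List (String × Int)) (out : (List (String × Int)) × (List (String × List Int)) × Int) : Decidable (Spec_process_run_length run_length out) := by unfold Spec_process_run_length; infer_instance

-- ===== CLAIM (what is proved, stated in full; the proofs are below) =====
def Claim_equal_process_run_length : Prop := ∀ (run_length : List (String × Int)), Dom_process_run_length run_length → Spec_process_run_length run_length (process_run_length run_length)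

-- ===== LEMMAS AND PROOFS =====

-- proof-side model of A's dd-accumulator: the same grouping A performs, isolated from d
def pvStepB (dd : PySem.Dict String (List Int)) (p : String × Int) : PySem.Dict String (List Int) :=
  dd.modify p.1 [] (· ++ [p.2])

def pvDofDD (dd : PySem.Dict String (List Int)) : PySem.Dict String Int :=
  PySem.Dict.mk (dd.items.map (fun p => (p.1, pvMaxI p.2)))

-- dd built by the grouping loop is well-shaped: distinct keys, and every stored list is nonempty
def pvGood (dd : PySem.Dict String (List Int)) : Prop :=
  dd.keys.Nodup ∧ ∀ p ∈ dd.items, p.2 ≠ []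

lemma pvGood_step (dd : PySem.Dict String (List Int)) (p : String × Int) (h : pvGood dd) :
    pvGood (pvStepB dd p) := by
  obtain ⟨h1, h2⟩ := h
  constructor
  · simpa [pvStepB, PySem.Dict.modify] using PySem.Dict.nodup_keys_insert _ _ _ h1
  · intro q hq
    simp only [pvStepB, PySem.Dict.modify, PySem.Dict.mem_items_insert] at hq
    rcases hq with rfl | ⟨hq, _⟩
    · simp
    · exact h2 _ hq

lemma pv_get?_DofDD (dd : PySem.Dict String (List Int)) (k : String) :
    (pvDofDD dd).get? k = (dd.get? k).map pvMaxI := by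
  obtain ⟨l⟩ := dd
  induction l with
  | nil => simp [pvDofDD, PySem.Dict.get?]
  | cons p t ih =>
    obtain ⟨a, b⟩ := p
    simp only [pvDofDD, List.map_cons, PySem.Dict.get?_mk_cons]
    by_cases h : a == k
    · simp [h]
    · simpa [pvDofDD, h] using ih

lemma pv_contains_DofDD (dd : PySem.Dict String (List Int)) (k : String) :
    (pvDofDD dd).contains k = dd.contains k := by
  rw [PySem.Dict.contains_eq_isSome_get?, PySem.Dict.contains_eq_isSome_get?, pv_get?_DofDD]
  simp

lemma pv_max?_cons (a : Int) (t : List Int) :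
    PySem.List.max? (a :: t) (fun x => x) = some (t.foldl (fun m v => if m < v then v else m) a) := by
  induction t generalizing a with
  | nil => rfl
  | cons v t ih =>
    simp only [PySem.List.max?, List.foldl_cons] at ih ⊢
    by_cases hv : a < v <;> simp [hv, ih]

lemma pvMaxI_cons (a : Int) (t : List Int) :
    pvMaxI (a :: t) = t.foldl (fun m v => if m < v then v else m) a := by
  simp [pvMaxI, pv_max?_cons]

lemma pvMaxI_append (l : List Int) (c : Int) (h : l ≠ []) :
    pvMaxI (l ++ [c]) = if pvMaxI l < c then c else pvMaxI l := by
  obtain ⟨a, t, rfl⟩ : ∃ a t, l = a :: t := by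
    cases l with
    | nil => exact absurd rfl h
    | cons a t => exact ⟨a, t, rfl⟩
  rw [List.cons_append, pvMaxI_cons, pvMaxI_cons, List.foldl_append]
  simp

lemma pv_get?_of_contains (dd : PySem.Dict String (List Int)) (e : String)
    (h : dd.contains e = true) : dd.get? e = some (dd.getD e []) := by
  rw [PySem.Dict.contains_eq_isSome_get?] at h
  obtain ⟨v, hv⟩ := Option.isSome_iff_exists.mp h
  simp [PySem.Dict.getD_eq_get?_getD, hv]

lemma pv_step_comm (dd : PySem.Dict String (List Int)) (p : String × Int) (h : pvGood dd) :
    pvStepA (pvDofDD dd, dd) p = (pvDofDD (pvStepB dd p), pvStepB dd p) := by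
  obtain ⟨e, c⟩ := p
  obtain ⟨hnd, hne⟩ := h
  by_cases hc : dd.contains e = true
  · have hget : dd.get? e = some (dd.getD e []) := pv_get?_of_contains dd e hc
    have hold : dd.getD e [] ≠ [] :=
      hne _ (PySem.Dict.mem_items_of_get?_eq_some dd hget)
    have hgd : (pvDofDD dd).getD e 0 = pvMaxI (dd.getD e []) := by
      rw [PySem.Dict.getD_eq_get?_getD, pv_get?_DofDD, hget]; rfl
    have hitems : ∀ q ∈ dd.items, q.1 = e → q.2 = dd.getD e [] := by
      intro q hq hqe
      obtain ⟨k, v⟩ := q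
      have h1 : dd.get? k = some v := PySem.Dict.get?_of_mem_items dd hq hnd
      subst hqe
      rw [hget] at h1
      exact (Option.some_inj.mp h1).symm
    have hmaxapp : pvMaxI (dd.getD e [] ++ [c]) =
        if pvMaxI (dd.getD e []) < c then c else pvMaxI (dd.getD e []) := pvMaxI_append _ _ hold
    have hcontD : (pvDofDD dd).contains e = true := by rw [pv_contains_DofDD]; exact hc
    have key : pvDofDD (dd.insert e (dd.getD e [] ++ [c])) =
        if pvMaxI (dd.getD e []) < c then (pvDofDD dd).insert e c else pvDofDD dd := by
      apply PySem.Dict.ext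
      rw [pvDofDD, PySem.Dict.items_insert_of_contains dd _ hc]
      by_cases hlt : pvMaxI (dd.getD e []) < c
      · simp only [hlt, if_true]
        rw [PySem.Dict.items_insert_of_contains (pvDofDD dd) _ hcontD]
        simp only [pvDofDD, List.map_map]
        apply List.map_congr_left
        intro q hq
        by_cases hqe : q.1 == e
        · have h2 := hitems q hq (by simpa using hqe)
          simp [Function.comp, hqe, hmaxapp, hlt]
        · simp [Function.comp, hqe]
      · simp only [hlt, if_false]
        simp only [pvDofDD, List.map_map]
        apply List.map_congr_left
        intro q hq
        by_cases hqe : q.1 == e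
        · have h2 := hitems q hq (by simpa using hqe)
          have h1 : q.1 = e := by simpa using hqe
          simp [Function.comp, hmaxapp, h2, hlt, h1]
        · simp [Function.comp, hqe]
    simp only [pvStepA, pvStepB, PySem.Dict.modify, hc, pv_contains_DofDD, if_true, hgd, key]
  · have hc' : dd.contains e = false := by simpa using hc
    have hcontD : (pvDofDD dd).contains e = false := by rw [pv_contains_DofDD]; exact hc'
    have key2 : pvDofDD (dd.insert e [c]) = (pvDofDD dd).insert e c := by
      apply PySem.Dict.ext
      rw [PySem.Dict.items_insert_of_not_contains (pvDofDD dd) _ hcontD]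
      conv_lhs => rw [pvDofDD]
      rw [PySem.Dict.items_insert_of_not_contains dd _ hc']
      simp [pvDofDD, pvMaxI_cons]
    simp only [pvStepA, pvStepB, PySem.Dict.modify, hc', pv_contains_DofDD,
      Bool.false_eq_true, if_false, PySem.Dict.getD_of_not_contains _ _ hc', List.nil_append, key2]

lemma pv_loop (l : List (String × Int)) :
    ∀ dd : PySem.Dict String (List Int), pvGood dd →
      l.foldl pvStepA (pvDofDD dd, dd) = (pvDofDD (l.foldl pvStepB dd), l.foldl pvStepB dd) := by
  induction l with
  | nil => intro dd _; rfl
  | cons p t ih =>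
    intro dd h
    simp only [List.foldl_cons, pv_step_comm dd p h]
    exact ih _ (pvGood_step dd p h)

-- the two negative-max computations agree for any dict and any start accumulator
lemma pv_negmax (es : List String) (d : PySem.Dict String Int) (a : Int) :
    es.foldl (fun nm e => if d.contains e then (if d.getD e 0 > nm then d.getD e 0 else nm) else nm) a
      = (PySem.List.max? (a :: es.filterMap (fun e => d.get? e)) (fun x => x)).getD 0 := by
  rw [pv_max?_cons]
  simp only [Option.getD_some]
  induction es generalizing a with
  | nil => rfl
  | cons e t ih =>
    simp only [List.foldl_cons, List.filterMap_cons]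
    cases h : d.get? e with
    | none =>
      have hc : d.contains e = false := by rw [PySem.Dict.contains_eq_isSome_get?, h]; rfl
      simp only [hc, Bool.false_eq_true, if_false]
      exact ih a
    | some v =>
      have hc : d.contains e = true := by rw [PySem.Dict.contains_eq_isSome_get?, h]; rfl
      have hgd : d.getD e 0 = v := by rw [PySem.Dict.getD_eq_get?_getD, h]; rfl
      simp only [hc, if_true, hgd, List.foldl_cons, gt_iff_lt]
      exact ih _

lemma pvGood_empty : pvGood PySem.Dict.empty := by
  constructor
  · simp [PySem.Dict.keys_empty]
  · intro p hp; simp [PySem.Dict.empty] at hp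

lemma pvDofDD_empty : pvDofDD PySem.Dict.empty = PySem.Dict.empty := rfl

-- the grouping fold, read off as B computes it: distinct keys, each with its filtered runs
lemma pv_G_items (l : List (String × Int)) :
    (l.foldl pvStepB PySem.Dict.empty).items
      = (PySem.List.dedup (l.map (·.1))).map (fun e => (e, pvRuns l e)) := by
  have hnd : (l.foldl pvStepB PySem.Dict.empty).keys.Nodup := by
    have := PySem.Dict.nodup_keys_foldl_modify_key l (fun p : String × Int => p.1)
      ([] : List Int) (fun _ p => (· ++ [p.2])) PySem.Dict.empty
      (by simp [PySem.Dict.keys_empty])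
    simpa [pvStepB] using this
  rw [PySem.Dict.items_eq_map_keys _ hnd ([] : List Int)]
  have hkeys : (l.foldl pvStepB PySem.Dict.empty).keys = PySem.Set.ofList (l.map (·.1)) := by
    have := PySem.Dict.keys_foldl_modify_key l (fun p : String × Int => p.1)
      ([] : List Int) (fun _ p => (· ++ [p.2])) PySem.Dict.empty
    simpa [pvStepB, PySem.Dict.keys_empty, PySem.Set.update_nil_left] using this
  rw [hkeys]
  rw [show PySem.List.dedup (l.map (·.1)) = PySem.Set.ofList (l.map (·.1)) from PySem.List.dedup_eq_ofList _]
  apply List.map_congr_left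
  intro e _
  have h2 : (l.foldl pvStepB PySem.Dict.empty).getD e [] = pvRuns l e := by
    have := PySem.Dict.getD_foldl_modify_append l PySem.Dict.empty e
    simpa [PySem.Dict.getD_empty, pvRuns] using this
  rw [h2]

-- ===== VERDICT (by name: the statement is the Claim_ definition above) =====
theorem process_run_length_spec : Claim_equal_process_run_length := by
  intro run_length _
  unfold Spec_process_run_length process_run_length process_run_length_alt
  have h := pv_loop run_length PySem.Dict.empty pvGood_empty
  rw [pvDofDD_empty] at h
  simp only [h, pv_negmax, pv_G_items, pvDofDD, List.map_map, Function.comp_def]
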